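-- pv_equiv track=rewrite | github.com/Bharath-Naveen/containerized-phishing-project | src/app_v1/enrich_dataset.py | _detect_url_column
-- ===== SOURCE A (Python) =====
-- from typing import Iterable, List, Optional, Tuple
--
-- URL_CANDIDATE_COLUMN_NAMES: Tuple[str, ...] = ("url", "URL", "link", "webpage")
--
-- def _detect_url_column(columns: Iterable[str]) -> Optional[str]:
--     """Detect the URL column by name using simple heuristics."""
--     cols = list(columns)
--     lower_map = {c.lower(): c for c in cols}
--     for candidate in URL_CANDIDATE_COLUMN_NAMES:
--         key = candidate.lower()
--         if key in lower_map:
--             return lower_map[key]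
--     return None
-- ===== SOURCE B (Python) =====
-- from typing import Iterable, Optional, Tuple
--
-- URL_CANDIDATE_COLUMN_NAMES: Tuple[str, ...] = ("url", "URL", "link", "webpage")
--
-- def _detect_url_column(columns: Iterable[str]) -> Optional[str]:
--     """Detect the URL column by name using simple heuristics."""
--     priority = [name.lower() for name in URL_CANDIDATE_COLUMN_NAMES]
--     best = None
--     best_rank = len(priority)
--     for col in columns:
--         try:
--             rank = priority.index(col.lower())
--         except ValueError:
--             continue
--         if rank < best_rank:
--             best, best_rank = col, rank
--     return best
-- ===== Notes on version B (the rewrite author's own statement) =====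
-- stated objective: alternative
-- what changed: Single pass over the columns tracking the best (lowest-priority-rank) case-insensitive candidate match, instead of building a lowercase->column dict and probing candidates in order; Pre_ excludes lists with two distinct spellings of the same candidate name, where A's last-duplicate dict-overwrite choice is accidental (B keeps the first).
-- outside the precondition, e.g. on _detect_url_column(['URL', 'Url']): A returns 'Url', B returns 'URL'
import Mathlib
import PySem

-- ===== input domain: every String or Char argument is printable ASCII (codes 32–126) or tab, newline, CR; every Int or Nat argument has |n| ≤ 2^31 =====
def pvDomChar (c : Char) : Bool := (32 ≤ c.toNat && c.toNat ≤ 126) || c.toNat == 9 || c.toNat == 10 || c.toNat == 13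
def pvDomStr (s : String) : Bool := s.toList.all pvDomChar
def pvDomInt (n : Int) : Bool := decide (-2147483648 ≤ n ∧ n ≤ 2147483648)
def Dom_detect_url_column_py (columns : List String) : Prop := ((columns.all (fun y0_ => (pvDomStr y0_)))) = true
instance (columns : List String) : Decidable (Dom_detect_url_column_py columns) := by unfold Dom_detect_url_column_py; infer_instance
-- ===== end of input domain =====

-- B replaces A's precomputed lowercase->column dict probed per candidate by a single pass over
-- the columns that keeps the best (lowest-priority-rank) case-insensitive match (alternative
-- decomposition; trades A's dict for repeated priority-list lookups); Pre_ excludes lists with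
-- two distinct spellings of the same candidate name, where A's last-duplicate dict-overwrite
-- choice is accidental.


-- ===== PORT A =====
def urlCandidateColumnNames : List String := ["url", "URL", "link", "webpage"]

-- A's for-loop over URL_CANDIDATE_COLUMN_NAMES with its early return
def aCandLoop (lowerMap : PySem.Dict String String) : List String → Option String
  | [] => none
  | candidate :: rest =>
    let key := PySem.Str.lower candidate
    if lowerMap.contains key then lowerMap.get? key else aCandLoop lowerMap rest

def detect_url_column_py (columns : List String) : Option String :=
  let cols := columns
  let lowerMap := cols.foldl (fun d c => d.insert (PySem.Str.lower c) c) PySem.Dict.empty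
  aCandLoop lowerMap urlCandidateColumnNames

-- ===== PORT B =====
-- one loop step: look up the rank of the column's lowercase form in the priority list
-- (priority.index with ValueError -> continue), keep the strictly better match
def bStep (priority : List String) (st : Option String × Nat) (col : String) :
    Option String × Nat :=
  match PySem.List.index? priority (PySem.Str.lower col) with
  | none => st
  | some rank => if rank < st.2 then (some col, rank) else st

def detect_url_column_py_alt (columns : List String) : Option String :=
  let priority := urlCandidateColumnNames.map PySem.Str.lower
  (columns.foldl (bStep priority) (none, priority.length)).1

-- ===== PRECONDITION & SPEC =====
-- Pre_ excludes column lists containing two DISTINCT spellings of the same candidate name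
-- ("url"/"link"/"webpage", case-insensitively): there A returns the LAST duplicate only as an
-- accident of the dict comprehension's overwrite order, while B keeps the first; both choices
-- are defensible.
def Pre_detect_url_column_py (columns : List String) : Prop :=
  (columns.filter (fun c => PySem.Str.lower c == "url")).Pairwise (· = ·) ∧
  (columns.filter (fun c => PySem.Str.lower c == "link")).Pairwise (· = ·) ∧
  (columns.filter (fun c => PySem.Str.lower c == "webpage")).Pairwise (· = ·)
instance (columns : List String) : Decidable (Pre_detect_url_column_py columns) := by
  unfold Pre_detect_url_column_py; infer_instance

def pvWitness_detect_url_column_py : List String := ["id", "URL", "notes"]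

def Spec_detect_url_column_py (columns : List String) (out : Option String) : Prop := out = detect_url_column_py_alt columns
instance (columns : List String) (out : Option String) : Decidable (Spec_detect_url_column_py columns out) := by unfold Spec_detect_url_column_py; infer_instance

-- ===== CLAIM (what is proved, stated in full; the proofs are below) =====
def Claim_equal_detect_url_column_py : Prop := ∀ (columns : List String), Dom_detect_url_column_py columns → Pre_detect_url_column_py columns → Spec_detect_url_column_py columns (detect_url_column_py columns)

-- ===== LEMMAS AND PROOFS =====

-- the lowered priority list is concrete
lemma priority_eq : urlCandidateColumnNames.map PySem.Str.lower = ["url", "url", "link", "webpage"] := by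
  decide

-- rank lookup on the concrete priority list
lemma rank_char (s : String) :
    PySem.List.index? ["url", "url", "link", "webpage"] s =
      if s = "url" then some 0 else if s = "link" then some 2
      else if s = "webpage" then some 3 else none := by
  by_cases h1 : s = "url"
  · subst h1; decide
  · by_cases h2 : s = "link"
    · subst h2; decide
    · by_cases h3 : s = "webpage"
      · subst h3; decide
      · simp only [if_neg h1, if_neg h2, if_neg h3]
        rw [PySem.List.index?_eq_none_iff]
        simp [List.mem_cons, h1, h2, h3]

-- B's fold from the four reachable rank states
lemma fold0 (cols : List String) (b : Option String) :
    cols.foldl (bStep ["url", "url", "link", "webpage"]) (b, 0) = (b, 0) := by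
  induction cols with
  | nil => rfl
  | cons c cs ih =>
    have hstep : bStep ["url", "url", "link", "webpage"] (b, 0) c = (b, 0) := by
      unfold bStep; rw [rank_char]; split_ifs <;> simp
    simp only [List.foldl_cons, hstep, ih]

lemma fold2 (cols : List String) (b : Option String) :
    (cols.foldl (bStep ["url", "url", "link", "webpage"]) (b, 2)).1 =
      (cols.find? (fun c => PySem.Str.lower c == "url")).or b := by
  induction cols generalizing b with
  | nil => rfl
  | cons c cs ih =>
    by_cases hu : PySem.Str.lower c = "url"
    · have hstep : bStep ["url", "url", "link", "webpage"] (b, 2) c = (some c, 0) := by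
        unfold bStep; rw [rank_char, if_pos hu]; simp
      simp only [List.foldl_cons, hstep, fold0]
      simp [List.find?_cons, hu]
    · have hstep : bStep ["url", "url", "link", "webpage"] (b, 2) c = (b, 2) := by
        unfold bStep; rw [rank_char, if_neg hu]; split_ifs <;> simp
      simp only [List.foldl_cons, hstep, ih]
      simp [List.find?_cons, hu]

lemma fold3 (cols : List String) (b : Option String) :
    (cols.foldl (bStep ["url", "url", "link", "webpage"]) (b, 3)).1 =
      (cols.find? (fun c => PySem.Str.lower c == "url")).or
        ((cols.find? (fun c => PySem.Str.lower c == "link")).or b) := by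
  induction cols generalizing b with
  | nil => rfl
  | cons c cs ih =>
    by_cases hu : PySem.Str.lower c = "url"
    · have hstep : bStep ["url", "url", "link", "webpage"] (b, 3) c = (some c, 0) := by
        unfold bStep; rw [rank_char, if_pos hu]; simp
      simp only [List.foldl_cons, hstep, fold0]
      simp [List.find?_cons, hu]
    · by_cases hl : PySem.Str.lower c = "link"
      · have hstep : bStep ["url", "url", "link", "webpage"] (b, 3) c = (some c, 2) := by
          unfold bStep; rw [rank_char, if_neg hu, if_pos hl]; simp
        simp only [List.foldl_cons, hstep, fold2]
        simp [List.find?_cons, hu, hl]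
      · have hstep : bStep ["url", "url", "link", "webpage"] (b, 3) c = (b, 3) := by
          unfold bStep; rw [rank_char, if_neg hu, if_neg hl]; split_ifs <;> simp
        simp only [List.foldl_cons, hstep, ih]
        simp [List.find?_cons, hu, hl]

lemma fold4 (cols : List String) (b : Option String) :
    (cols.foldl (bStep ["url", "url", "link", "webpage"]) (b, 4)).1 =
      (cols.find? (fun c => PySem.Str.lower c == "url")).or
        ((cols.find? (fun c => PySem.Str.lower c == "link")).or
          ((cols.find? (fun c => PySem.Str.lower c == "webpage")).or b)) := by
  induction cols generalizing b with
  | nil => rfl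
  | cons c cs ih =>
    by_cases hu : PySem.Str.lower c = "url"
    · have hstep : bStep ["url", "url", "link", "webpage"] (b, 4) c = (some c, 0) := by
        unfold bStep; rw [rank_char, if_pos hu]; simp
      simp only [List.foldl_cons, hstep, fold0]
      simp [List.find?_cons, hu]
    · by_cases hl : PySem.Str.lower c = "link"
      · have hstep : bStep ["url", "url", "link", "webpage"] (b, 4) c = (some c, 2) := by
          unfold bStep; rw [rank_char, if_neg hu, if_pos hl]; simp
        simp only [List.foldl_cons, hstep, fold2]
        simp [List.find?_cons, hu, hl]
      · by_cases hw : PySem.Str.lower c = "webpage"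
        · have hstep : bStep ["url", "url", "link", "webpage"] (b, 4) c = (some c, 3) := by
            unfold bStep; rw [rank_char, if_neg hu, if_neg hl, if_pos hw]; simp
          simp only [List.foldl_cons, hstep, fold3]
          simp [List.find?_cons, hu, hl, hw]
        · have hstep : bStep ["url", "url", "link", "webpage"] (b, 4) c = (b, 4) := by
            unfold bStep; rw [rank_char, if_neg hu, if_neg hl, if_neg hw]
          simp only [List.foldl_cons, hstep, ih]
          simp [List.find?_cons, hu, hl, hw]

lemma alt_char (cols : List String) :
    detect_url_column_py_alt cols =
      (cols.find? (fun c => PySem.Str.lower c == "url")).or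
        ((cols.find? (fun c => PySem.Str.lower c == "link")).or
          (cols.find? (fun c => PySem.Str.lower c == "webpage"))) := by
  unfold detect_url_column_py_alt
  rw [priority_eq]
  simp only [List.length_cons, List.length_nil]
  rw [show (0 + 1 + 1 + 1 + 1 : Nat) = 4 from rfl, fold4]
  simp

-- A's dict lookup of `key` = the last-match fold over the columns
lemma get?_foldl_insert_lower (cols : List String) (d : PySem.Dict String String) (key : String) :
    (cols.foldl (fun d c => d.insert (PySem.Str.lower c) c) d).get? key
      = cols.foldl (fun found c => if PySem.Str.lower c == key then some c else found) (d.get? key) := by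
  induction cols generalizing d with
  | nil => rfl
  | cons c rest ih =>
    simp only [List.foldl_cons, ih, PySem.Dict.get?_insert]
    by_cases h : key = PySem.Str.lower c
    · simp [h]
    · simp [h, Ne.symm h, beq_iff_eq]

-- the last-match fold = find? over the reversed list
lemma lastMatch_eq_rev_find? (p : String → Bool) (cols : List String) (a : Option String) :
    cols.foldl (fun found c => if p c then some c else found) a
      = (cols.reverse.find? p).or a := by
  induction cols generalizing a with
  | nil => rfl
  | cons c cs ih =>
    simp only [List.foldl_cons, ih, List.reverse_cons]
    rw [List.find?_append]
    cases hf : cs.reverse.find? p with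
    | some x => simp
    | none =>
      simp only [hf, Option.none_or]
      cases hp : p c <;> simp [List.find?_cons, hp]

-- with at most one match, searching from either end finds the same element
lemma find?_eq_head?_filter (p : String → Bool) (cols : List String) :
    cols.find? p = (cols.filter p).head? := by
  induction cols with
  | nil => rfl
  | cons c cs ih =>
    rw [List.find?_cons, List.filter_cons]
    cases hp : p c
    · exact ih
    · rfl

lemma head?_reverse_of_pairwise_eq (l : List String) (h : l.Pairwise (· = ·)) :
    l.reverse.head? = l.head? := by
  cases l with
  | nil => rfl
  | cons c t =>
    have hall : ∀ x ∈ t, c = x := (List.pairwise_cons.mp h).1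
    rw [List.reverse_cons, List.head?_append]
    cases ht : t.reverse.head? with
    | none => rfl
    | some x =>
      have hx : x ∈ t := List.mem_reverse.mp (List.mem_of_mem_head? ht)
      simp [hall x hx]

lemma rev_find?_of_unique (p : String → Bool) (cols : List String)
    (h : (cols.filter p).Pairwise (· = ·)) : cols.reverse.find? p = cols.find? p := by
  rw [find?_eq_head?_filter, find?_eq_head?_filter, List.filter_reverse]
  exact head?_reverse_of_pairwise_eq _ h

-- A as the candidate-ordered chain of last matches
lemma a_char (cols : List String) :
    detect_url_column_py cols =
      (cols.reverse.find? (fun c => PySem.Str.lower c == "url")).or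
        ((cols.reverse.find? (fun c => PySem.Str.lower c == "link")).or
          (cols.reverse.find? (fun c => PySem.Str.lower c == "webpage"))) := by
  unfold detect_url_column_py
  simp only [urlCandidateColumnNames, aCandLoop]
  rw [show PySem.Str.lower "url" = "url" from by decide,
      show PySem.Str.lower "URL" = "url" from by decide,
      show PySem.Str.lower "link" = "link" from by decide,
      show PySem.Str.lower "webpage" = "webpage" from by decide]
  rw [PySem.Dict.contains_eq_isSome_get?, PySem.Dict.contains_eq_isSome_get?,
      PySem.Dict.contains_eq_isSome_get?]
  rw [get?_foldl_insert_lower, get?_foldl_insert_lower, get?_foldl_insert_lower]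
  rw [show (PySem.Dict.empty : PySem.Dict String String).get? "url" = none from rfl,
      show (PySem.Dict.empty : PySem.Dict String String).get? "link" = none from rfl,
      show (PySem.Dict.empty : PySem.Dict String String).get? "webpage" = none from rfl]
  rw [lastMatch_eq_rev_find?, lastMatch_eq_rev_find?, lastMatch_eq_rev_find?]
  cases h1 : cols.reverse.find? (fun c => PySem.Str.lower c == "url") with
  | some u => simp [h1]
  | none =>
    cases h2 : cols.reverse.find? (fun c => PySem.Str.lower c == "link") with
    | some l => simp [h1, h2]
    | none =>
      cases h3 : cols.reverse.find? (fun c => PySem.Str.lower c == "webpage") with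
      | some w => simp [h1, h2, h3]
      | none => simp [h1, h2, h3]

-- ===== VERDICT (by name: the statement is the Claim_ definition above) =====
theorem detect_url_column_py_spec : Claim_equal_detect_url_column_py := by
  intro cols _ pre
  unfold Spec_detect_url_column_py
  obtain ⟨hu, hl, hw⟩ := pre
  rw [a_char, alt_char,
      rev_find?_of_unique _ _ hu, rev_find?_of_unique _ _ hl, rev_find?_of_unique _ _ hw]
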